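-- pv_equiv track=rewrite | github.com/gongtian1234/-offer | test33_二叉搜索树的后序遍历序列.py | verifySquenceOfBST
-- ===== SOURCE A (Python) =====
-- def verifySquenceOfBST(sequence):
--     if sequence==[]:
--         return True   # 因为空树也是搜索二叉树
--
--     rootNum = sequence.pop()
--     index = None      # 用来标记左右子树的分界线，指向的是右子树的节点位置
--     for i in range(len(sequence)):
--         if index is None and sequence[i]>rootNum:
--             index = i
--         if index is not None and sequence[i]<rootNum:
--             return False
--     leftRst = verifySquenceOfBST(sequence[:index])
--     rightRst = verifySquenceOfBST(sequence[index:])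
--
--     return leftRst and rightRst
-- ===== SOURCE B (Python) =====
-- def verifySquenceOfBST(sequence):
--     # Single pass over the reversed sequence with a monotonic stack: O(n)
--     # instead of A's scan-and-recurse (quadratic, exponential on all-small splits).
--     root = None
--     stack = []
--     for v in reversed(sequence):
--         if root is not None and v > root:
--             return False
--         while stack and stack[-1] > v:
--             root = stack.pop()
--         stack.append(v)
--     return True
-- ===== Notes on version B (the rewrite author's own statement) =====
-- stated objective: faster
-- what changed: Replaced A's recursive find-split-then-check over slices (which re-scans each subtree and recurses twice when no element exceeds the root) by a single backward pass with a monotonic stack maintaining the current upper bound.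
import Mathlib
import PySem

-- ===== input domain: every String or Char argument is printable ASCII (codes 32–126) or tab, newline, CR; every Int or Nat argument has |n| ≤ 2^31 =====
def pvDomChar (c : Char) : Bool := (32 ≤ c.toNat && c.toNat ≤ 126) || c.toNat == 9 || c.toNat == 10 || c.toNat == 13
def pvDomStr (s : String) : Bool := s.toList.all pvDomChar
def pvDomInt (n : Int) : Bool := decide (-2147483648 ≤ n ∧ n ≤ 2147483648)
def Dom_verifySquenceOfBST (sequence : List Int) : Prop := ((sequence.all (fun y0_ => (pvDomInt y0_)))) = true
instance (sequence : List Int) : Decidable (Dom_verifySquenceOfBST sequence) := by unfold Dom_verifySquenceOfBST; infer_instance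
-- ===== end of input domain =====

-- B replaces A's recursive find-split-then-check over slices by a single backward
-- pass with a monotonic stack (objective: faster, measured).
-- A mutates its argument (pop()); the equivalence proved here is about the return value only.

-- ===== PORT A =====
-- the 'for i in range(len(sequence))' loop of A: state = (index : Option Nat, position i);
-- result none = the early 'return False', some index = loop finished.
def loopA (xs : List Int) (rootNum : Int) (index : Option Nat) (i : Nat) : Option (Option Nat) :=
  match xs with
  | [] => some index
  | v :: rest =>
    let index' := if index.isNone && decide (rootNum < v) then some i else index
    if index'.isSome && decide (v < rootNum) then none
    else loopA rest rootNum index' (i + 1)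

-- 'sequence.pop()' = getLast / dropLast; the slices sequence[:index] / sequence[index:] are
-- take / drop (index is either None — whole list both times, as in Python — or an in-range
-- non-negative position, where Python slicing and take/drop agree exactly).
def verifySquenceOfBST (sequence : List Int) : Bool :=
  if h : sequence = [] then true
  else
    let rootNum := sequence.getLast h
    let rest := sequence.dropLast
    match loopA rest rootNum none 0 with
    | none => false
    | some none =>
        let leftRst := verifySquenceOfBST rest
        let rightRst := verifySquenceOfBST rest
        leftRst && rightRst
    | some (some i) =>
        let leftRst := verifySquenceOfBST (rest.take i)
        let rightRst := verifySquenceOfBST (rest.drop i)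
        leftRst && rightRst
termination_by sequence.length
decreasing_by
  all_goals
    have hpos : 0 < sequence.length := List.length_pos_iff.mpr h
    simp [List.length_dropLast, List.length_take, List.length_drop]
    omega

-- ===== PORT B =====
-- the inner 'while stack and stack[-1] > v' loop of Source B (stack top = list head here)
def popLoop (v : Int) (root : Option Int) (stack : List Int) : Option Int × List Int :=
  match stack with
  | [] => (root, [])
  | t :: rest => if v < t then popLoop v (some t) rest else (root, t :: rest)

-- the 'for v in reversed(sequence)' loop of Source B
def loopB (xs : List Int) (root : Option Int) (stack : List Int) : Bool :=
  match xs with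
  | [] => true
  | v :: rest =>
    if (match root with | some r => decide (r < v) | none => false) then false
    else
      let p := popLoop v root stack
      loopB rest p.1 (v :: p.2)

def verifySquenceOfBST_alt (sequence : List Int) : Bool :=
  loopB sequence.reverse none []

-- ===== PRECONDITION & SPEC =====
def Spec_verifySquenceOfBST (sequence : List Int) (out : Bool) : Prop := out = verifySquenceOfBST_alt sequence
instance (sequence : List Int) (out : Bool) : Decidable (Spec_verifySquenceOfBST sequence out) := by unfold Spec_verifySquenceOfBST; infer_instance

-- ===== CLAIM (what is proved, stated in full; the proofs are below) =====
def Claim_equal_verifySquenceOfBST : Prop := ∀ (sequence : List Int), Dom_verifySquenceOfBST sequence → Spec_verifySquenceOfBST sequence (verifySquenceOfBST sequence)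

-- ===== LEMMAS AND PROOFS =====

-- x ≤ the optional bound (none = +infinity)
def obLE (x : Int) (b : Option Int) : Prop := match b with | none => True | some r => x ≤ r

-- a ≤ b on optional bounds
def obLEo (a b : Option Int) : Prop := b = none ∨ (∃ x y, a = some x ∧ b = some y ∧ x ≤ y)

-- one iteration of Source B's main loop as a state transformer (none = returned False)
def stepB (v : Int) (s : Option Int × List Int) : Option (Option Int × List Int) :=
  if (match s.1 with | some r => decide (r < v) | none => false) then none
  else some ((popLoop v s.1 s.2).1, v :: (popLoop v s.1 s.2).2)

def runB (xs : List Int) (s : Option Int × List Int) : Option (Option Int × List Int) :=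
  match xs with
  | [] => some s
  | v :: rest => match stepB v s with | none => none | some s' => runB rest s'

lemma loopB_eq_runB : ∀ (xs : List Int) (b : Option Int) (st : List Int),
    loopB xs b st = (runB xs (b, st)).isSome := by
  intro xs
  induction xs with
  | nil => intro b st; simp [loopB, runB]
  | cons v rest ih =>
    intro b st
    simp only [loopB, runB, stepB]
    cases b with
    | none => simp only []; exact ih _ _
    | some r =>
      by_cases h : r < v
      · simp [h]
      · simp [h, ih] 

lemma runB_append : ∀ (xs ys : List Int) (s : Option Int × List Int),
    runB (xs ++ ys) s = (runB xs s).bind (runB ys) := by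
  intro xs
  induction xs with
  | nil => intro ys s; simp [runB]
  | cons v rest ih =>
    intro ys s
    simp only [List.cons_append, runB]
    cases stepB v s with
    | none => simp
    | some s' => simp [ih] 

lemma popLoop_snd : ∀ (st : List Int) (v : Int) (b : Option Int),
    (popLoop v b st).2 = st.dropWhile (fun t => decide (v < t)) := by
  intro st
  induction st with
  | nil => intro v b; simp [popLoop]
  | cons t rest ih =>
    intro v b
    by_cases h : v < t
    · simp [popLoop, h, List.dropWhile, ih]
    · simp [popLoop, h, List.dropWhile] 

lemma popLoop_fst : ∀ (st : List Int) (v : Int) (b : Option Int),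
    (popLoop v b st).1 = b ∨ ∃ t, t ∈ st ∧ (popLoop v b st).1 = some t ∧ v < t := by
  intro st
  induction st with
  | nil => intro v b; simp [popLoop]
  | cons t rest ih =>
    intro v b
    by_cases h : v < t
    · simp only [popLoop, if_pos h]
      rcases ih v (some t) with h1 | ⟨u, hu, he, hv⟩
      · exact Or.inr ⟨t, by simp, h1, h⟩
      · exact Or.inr ⟨u, by simp [hu], he, hv⟩
    · simp [popLoop, h] 

lemma popLoop_append : ∀ (p2 : List Int) (v : Int) (b : Option Int) (junk : List Int),
    popLoop v b (p2 ++ junk) =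
      if (popLoop v b p2).2 = [] then popLoop v (popLoop v b p2).1 junk
      else ((popLoop v b p2).1, (popLoop v b p2).2 ++ junk) := by
  intro p2
  induction p2 with
  | nil => intro v b junk; simp [popLoop]
  | cons t rest ih =>
    intro v b junk
    by_cases h : v < t
    · simp only [List.cons_append, popLoop, if_pos h]
      exact ih v (some t) junk
    · simp [popLoop, h] 

lemma popLoop_all_gt : ∀ (st : List Int) (v : Int) (b : Option Int) (h : st ≠ []),
    (∀ t ∈ st, v < t) → popLoop v b st = (some (st.getLast h), []) := by
  intro st
  induction st with
  | nil => intro v b h; exact absurd rfl h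
  | cons t rest ih =>
    intro v b h hall
    have ht : v < t := hall t (by simp)
    cases rest with
    | nil => simp [popLoop, ht]
    | cons u rest2 =>
      have e1 : popLoop v b (t :: u :: rest2) = popLoop v (some t) (u :: rest2) := by
        conv_lhs => rw [popLoop]
        rw [if_pos ht]
      rw [e1, ih v (some t) (by simp) (fun x hx => hall x (by simp [hx]))]
      simp [List.getLast_cons] 

lemma mem_dropWhile_le : ∀ (st : List Int) (v t : Int), List.Pairwise (· ≥ ·) st →
    t ∈ st.dropWhile (fun t => decide (v < t)) → t ≤ v := by
  intro st
  induction st with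
  | nil => intro v t _ hm; simp [List.dropWhile] at hm
  | cons u rest ih =>
    intro v t hs hm
    rcases List.pairwise_cons.mp hs with ⟨hu, hrest⟩
    by_cases h : v < u
    · rw [List.dropWhile_cons_of_pos (by simpa using h)] at hm
      exact ih v t hrest hm
    · rw [List.dropWhile_cons_of_neg (by simpa using h)] at hm
      rcases List.mem_cons.mp hm with rfl | hm2
      · omega
      · have := hu t hm2; omega 

lemma sorted_dropWhile : ∀ (st : List Int) (v : Int), List.Pairwise (· ≥ ·) st →
    List.Pairwise (· ≥ ·) (v :: st.dropWhile (fun t => decide (v < t))) := by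
  intro st v hs
  refine List.pairwise_cons.mpr ⟨fun t ht => mem_dropWhile_le st v t hs ht, ?_⟩
  exact List.Pairwise.sublist (List.dropWhile_sublist _) hs 

lemma dropWhile_dropWhile {α : Type} (p q : α → Bool) (l : List α)
    (h : ∀ x, q x = true → p x = true) :
    (l.dropWhile q).dropWhile p = l.dropWhile p := by
  induction l with
  | nil => simp
  | cons x rest ih =>
    by_cases hq : q x = true
    · rw [List.dropWhile_cons_of_pos hq, List.dropWhile_cons_of_pos (h x hq), ih]
    · rw [List.dropWhile_cons_of_neg (by simp [hq])] 

lemma popLoop_fst_eq : ∀ (st : List Int) (v : Int) (b : Option Int),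
    (popLoop v b st).1 = match (st.takeWhile (fun t => decide (v < t))).getLast? with
      | none => b
      | some t => some t := by
  intro st
  induction st with
  | nil => intro v b; simp [popLoop]
  | cons t rest ih =>
    intro v b
    by_cases h : v < t
    · rw [List.takeWhile_cons_of_pos (by simpa using h)]
      have e1 : popLoop v b (t :: rest) = popLoop v (some t) rest := by
        conv_lhs => rw [popLoop]
        rw [if_pos h]
      rw [e1, ih v (some t)]
      rw [List.getLast?_cons]
      cases hgl : (rest.takeWhile (fun t => decide (v < t))).getLast? <;> simp [hgl]
    · rw [List.takeWhile_cons_of_neg (by simpa using h)]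
      simp [popLoop, h]

lemma obLEo_refl : ∀ (b : Option Int), obLEo b b := by
  intro b; cases b with
  | none => exact Or.inl rfl
  | some x => exact Or.inr ⟨x, x, rfl, rfl, le_refl x⟩

lemma obLE_to_obLEo : ∀ (x : Int) (b : Option Int), obLE x b → obLEo (some x) b := by
  intro x b h; cases b with
  | none => exact Or.inl rfl
  | some y => exact Or.inr ⟨x, y, rfl, rfl, h⟩

lemma obLE_trans : ∀ (x : Int) (a b : Option Int), obLE x a → obLEo a b → obLE x b := by
  intro x a b h1 h2
  rcases h2 with rfl | ⟨u, y, rfl, rfl, huy⟩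
  · trivial
  · simp only [obLE] at *; omega

def InvB (b : Option Int) (st : List Int) : Prop :=
  List.Pairwise (· ≥ ·) st ∧ ∀ t ∈ st, obLE t b

lemma popLoop_fst_obLEo : ∀ (st : List Int) (v : Int) (b : Option Int),
    (∀ t ∈ st, obLE t b) → obLEo (popLoop v b st).1 b := by
  intro st v b hm
  rcases popLoop_fst st v b with h | ⟨t, ht, he, _⟩
  · rw [h]; exact obLEo_refl b
  · rw [he]; exact obLE_to_obLEo t b (hm t ht)

lemma stepB_some_iff : ∀ (v : Int) (b : Option Int) (st : List Int) (s' : Option Int × List Int),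
    stepB v (b, st) = some s' →
    obLE v b ∧ s' = ((popLoop v b st).1, v :: (popLoop v b st).2) := by
  intro v b st s' h
  unfold stepB at h
  cases b with
  | none =>
    exact ⟨trivial, (Option.some_inj.mp h).symm⟩
  | some r =>
    by_cases hr : r < v
    · simp [hr] at h
    · simp only [show (match some r with | some x => decide (x < v) | none => false) = decide (r < v) from rfl,
        decide_eq_true_eq, if_neg hr] at h
      exact ⟨by simp only [obLE]; omega, (Option.some_inj.mp h).symm⟩

lemma stepB_ok : ∀ (v : Int) (b : Option Int) (st : List Int), obLE v b →
    stepB v (b, st) = some ((popLoop v b st).1, v :: (popLoop v b st).2) := by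
  intro v b st h
  unfold stepB
  cases b with
  | none => rfl
  | some r =>
    simp only [obLE] at h
    simp only [show (match some r with | some x => decide (x < v) | none => false) = decide (r < v) from rfl]
    rw [if_neg (by simp; omega)]

lemma stepB_inv : ∀ (v : Int) (b : Option Int) (st : List Int) (s' : Option Int × List Int),
    InvB b st → stepB v (b, st) = some s' → InvB s'.1 s'.2 := by
  intro v b st s' ⟨hs, hm⟩ h
  obtain ⟨hvb, rfl⟩ := stepB_some_iff v b st s' h
  constructor
  · simp only [popLoop_snd]
    exact sorted_dropWhile st v hs
  · intro t' ht'
    simp only [popLoop_snd] at ht'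
    rcases popLoop_fst st v b with hf | ⟨t, htmem, hf, hvt⟩ <;> rw [hf]
    · rcases List.mem_cons.mp ht' with rfl | h2
      · exact hvb
      · exact hm t' ((List.dropWhile_sublist _).subset h2)
    · simp only [obLE]
      rcases List.mem_cons.mp ht' with rfl | h2
      · omega
      · have := mem_dropWhile_le st v t' hs h2; omega

lemma runB_inv : ∀ (xs : List Int) (b : Option Int) (st : List Int) (s' : Option Int × List Int),
    InvB b st → runB xs (b, st) = some s' → InvB s'.1 s'.2 := by
  intro xs
  induction xs with
  | nil => intro b st s' hi h; cases h; exact hi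
  | cons v rest ih =>
    intro b st s' hi h
    unfold runB at h
    cases hst : stepB v (b, st) with
    | none => rw [hst] at h; cases h
    | some s1 =>
      rw [hst] at h
      exact ih s1.1 s1.2 s' (stepB_inv v b st s1 hi hst) h

lemma runB_bound : ∀ (xs : List Int) (b : Option Int) (st : List Int) (s' : Option Int × List Int),
    InvB b st → runB xs (b, st) = some s' → ∀ x ∈ xs, obLE x b := by
  intro xs
  induction xs with
  | nil => intro _ _ _ _ _ x hx; simp at hx
  | cons v rest ih =>
    intro b st s' hi h x hx
    unfold runB at h
    cases hst : stepB v (b, st) with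
    | none => rw [hst] at h; cases h
    | some s1 =>
      rw [hst] at h
      obtain ⟨hvb, rfl⟩ := stepB_some_iff v b st s1 hst
      rcases List.mem_cons.mp hx with rfl | hx2
      · exact hvb
      · have hinv1 := stepB_inv v b st _ hi hst
        have hx1 := ih _ _ s' hinv1 h x hx2
        exact obLE_trans x _ b hx1 (popLoop_fst_obLEo st v b hi.2)

-- simulation: the pristine state (none, []) accepts whatever a sorted richer state accepts
def SimR (p r : Option Int × List Int) : Prop :=
  (∃ junk, r.2 = p.2 ++ junk) ∧ List.Pairwise (· ≥ ·) r.2 ∧ obLEo r.1 p.1 ∧ (∀ t ∈ r.2, obLE t p.1)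

lemma sim_step : ∀ (v : Int) (p r r' : Option Int × List Int), SimR p r → stepB v r = some r' →
    ∃ p', stepB v p = some p' ∧ SimR p' r' := by
  rintro v ⟨bp, stp⟩ ⟨br, str⟩ r' ⟨⟨junk, hjunk⟩, hsort, hbo, hmem⟩ hstep
  simp only at hjunk hsort hbo hmem
  subst hjunk
  obtain ⟨hvbr, rfl⟩ := stepB_some_iff v br _ r' hstep
  have hvbp : obLE v bp := obLE_trans v br bp hvbr hbo
  refine ⟨((popLoop v bp stp).1, v :: (popLoop v bp stp).2), stepB_ok v bp stp hvbp, ?_⟩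
  have hsort' : List.Pairwise (· ≥ ·) (v :: (popLoop v br (stp ++ junk)).2) := by
    rw [popLoop_snd]
    exact sorted_dropWhile _ v hsort
  have hfst_p := popLoop_fst_eq stp v bp
  have hfst_r := popLoop_fst_eq stp v br
  by_cases hD : (popLoop v bp stp).2 = []
  case neg =>
    -- the pops stop inside the pristine stack: both machines pop the same prefix
    have hD2 : stp.dropWhile (fun t => decide (v < t)) ≠ [] := by rwa [popLoop_snd] at hD
    have hfull : popLoop v br (stp ++ junk) =
        ((popLoop v br stp).1, (popLoop v br stp).2 ++ junk) := by
      rw [popLoop_append, if_neg (by rwa [popLoop_snd, ← popLoop_snd stp v bp])]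
    rw [hfull]
    refine ⟨⟨junk, by simp [popLoop_snd]⟩, by rwa [hfull] at hsort', ?_, ?_⟩
    · rw [hfst_p, hfst_r]
      cases hgl : (stp.takeWhile (fun t => decide (v < t))).getLast? with
      | none => simpa using hbo
      | some t => simpa using obLEo_refl (some t)
    · intro t' ht'
      simp only [popLoop_snd, List.mem_cons, List.mem_append] at ht'
      rw [hfst_p]
      cases hgl : (stp.takeWhile (fun t => decide (v < t))).getLast? with
      | none =>
        rcases ht' with rfl | h2 | h3
        · exact hvbp
        · exact hmem t' (List.mem_append_left junk ((List.dropWhile_sublist _).subset h2))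
        · exact hmem t' (by simp [h3])
      | some t =>
        have htw : t ∈ stp.takeWhile (fun t => decide (v < t)) := List.mem_of_getLast? hgl
        have hvt : v < t := by simpa using List.mem_takeWhile_imp htw
        have hge : ∀ u ∈ stp.dropWhile (fun t => decide (v < t)) ++ junk, t ≥ u := by
          have : List.Pairwise (· ≥ ·) ((stp.takeWhile (fun t => decide (v < t)) ++
              stp.dropWhile (fun t => decide (v < t))) ++ junk) := by
            rwa [List.takeWhile_append_dropWhile]
          rw [List.append_assoc] at this
          exact fun u hu => (List.pairwise_append.mp this).2.2 t htw u hu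
        simp only [obLE]
        rcases ht' with rfl | h2 | h3
        · omega
        · have := hge t' (by simp [h2]); omega
        · have := hge t' (by simp [h3]); omega
  case pos =>
    -- the pristine stack is popped entirely; the rich machine continues into its extra part
    have hD2 : stp.dropWhile (fun t => decide (v < t)) = [] := by rwa [popLoop_snd] at hD
    have htwp : stp.takeWhile (fun t => decide (v < t)) = stp := by
      conv_rhs => rw [← List.takeWhile_append_dropWhile (p := fun t => decide (v < t)) (l := stp)]
      rw [hD2, List.append_nil]
    have hfull : popLoop v br (stp ++ junk) = popLoop v (popLoop v br stp).1 junk := by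
      rw [popLoop_append, if_pos (by rwa [popLoop_snd, ← popLoop_snd stp v bp])]
    rw [hfull]
    have hstp_mem : ∀ t ∈ stp, v < t := by
      intro t ht
      rw [← htwp] at ht
      simpa using List.mem_takeWhile_imp ht
    refine ⟨⟨(popLoop v (popLoop v br stp).1 junk).2, by simp [hD]⟩,
      by rwa [hfull] at hsort', ?_, ?_⟩
    · rw [hfst_p]
      rcases popLoop_fst junk v (popLoop v br stp).1 with hf | ⟨u, humem, hf, hvu⟩ <;> rw [hf]
      · rw [hfst_r, htwp]
        cases hgl : stp.getLast? with
        | none => simpa using hbo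
        | some t => simpa using obLEo_refl (some t)
      · rw [htwp]
        cases hgl : stp.getLast? with
        | none =>
          simp only
          exact obLE_to_obLEo u bp (hmem u (by simp [humem]))
        | some t =>
          have htmem : t ∈ stp := List.mem_of_getLast? hgl
          have : t ≥ u := (List.pairwise_append.mp hsort).2.2 t htmem u humem
          exact Or.inr ⟨u, t, rfl, rfl, this⟩
    · intro t' ht'
      simp only [popLoop_snd, List.mem_cons] at ht'
      rw [hfst_p, htwp]
      cases hgl : stp.getLast? with
      | none =>
        rcases ht' with rfl | h2
        · exact hvbp
        · exact hmem t' (by simp [(List.dropWhile_sublist _).subset h2])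
      | some t =>
        have htmem : t ∈ stp := List.mem_of_getLast? hgl
        have hvt : v < t := hstp_mem t htmem
        simp only [obLE]
        rcases ht' with rfl | h2
        · omega
        · have h3 : t' ∈ junk := (List.dropWhile_sublist _).subset h2
          have : t ≥ t' := (List.pairwise_append.mp hsort).2.2 t htmem t' h3
          omega

lemma sim_run : ∀ (xs : List Int) (p r : Option Int × List Int), SimR p r →
    (runB xs r).isSome → (runB xs p).isSome := by
  intro xs
  induction xs with
  | nil => intro p r _ _; simp [runB]
  | cons v rest ih =>
    intro p r hsim h
    unfold runB at h ⊢
    cases hst : stepB v r with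
    | none => rw [hst] at h; simp at h
    | some r1 =>
      rw [hst] at h
      obtain ⟨p1, hp1, hsim1⟩ := sim_step v p r r1 hsim hst
      rw [hp1]
      exact ih p1 r1 hsim1 h

lemma run_pristine : ∀ (xs : List Int) (b : Option Int) (st : List Int),
    List.Pairwise (· ≥ ·) st → (runB xs (b, st)).isSome → (runB xs (none, ([] : List Int))).isSome := by
  intro xs b st hs h
  refine sim_run xs (none, []) (b, st) ?_ h
  refine ⟨⟨st, by simp⟩, hs, Or.inl rfl, fun t _ => trivial⟩

lemma rootkeep : ∀ (ys : List Int) (b : Option Int) (st2 : List Int) (c : Int) (st' : List Int)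
    (s₁ : Option Int × List Int), (∀ y ∈ ys, c ≤ y) → (∀ t ∈ st2, c ≤ t) →
    runB ys (b, st2 ++ c :: st') = some s₁ →
    ∃ b₁ σ, s₁ = (b₁, σ ++ c :: st') ∧ ∀ t ∈ σ, c ≤ t := by
  intro ys
  induction ys with
  | nil =>
    intro b st2 c st' s₁ _ hst2 h
    cases h
    exact ⟨b, st2, rfl, hst2⟩
  | cons v rest ih =>
    intro b st2 c st' s₁ hys hst2 h
    have hcv : c ≤ v := hys v (by simp)
    unfold runB at h
    cases hst : stepB v (b, st2 ++ c :: st') with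
    | none => rw [hst] at h; cases h
    | some s2 =>
      rw [hst] at h
      obtain ⟨hvb, rfl⟩ := stepB_some_iff v b _ s2 hst
      replace h : runB rest ((popLoop v b (st2 ++ c :: st')).1, v :: (popLoop v b (st2 ++ c :: st')).2) = some s₁ := h
      by_cases hD : (popLoop v b st2).2 = []
      · have hnc : popLoop v (popLoop v b st2).1 (c :: st') = ((popLoop v b st2).1, c :: st') := by
          rw [popLoop]
          rw [if_neg (by omega)]
        rw [popLoop_append st2 v b (c :: st'), if_pos hD, hnc] at h
        have e2 : (v :: c :: st') = [v] ++ c :: st' := by simp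
        rw [e2] at h
        exact ih _ [v] c st' s₁ (fun y hy => hys y (by simp [hy])) (by simpa) h
      · rw [popLoop_append st2 v b (c :: st'), if_neg hD] at h
        have e2 : (v :: ((popLoop v b st2).2 ++ c :: st')) = (v :: (popLoop v b st2).2) ++ c :: st' := by simp
        rw [e2] at h
        refine ih _ (v :: (popLoop v b st2).2) c st' s₁ (fun y hy => hys y (by simp [hy])) ?_ h
        intro t ht
        rcases List.mem_cons.mp ht with rfl | h2
        · exact hcv
        · simp only [popLoop_snd] at h2
          exact hst2 t ((List.dropWhile_sublist _).subset h2)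

-- ===== A-side loop characterization =====
lemma loopA_none_all : ∀ (xs : List Int) (root : Int) (i : Nat),
    (∀ x ∈ xs, ¬ root < x) → loopA xs root none i = some none := by
  intro xs
  induction xs with
  | nil => intro root i _; rfl
  | cons v rest ih =>
    intro root i hall
    have h1 : ¬ root < v := hall v (by simp)
    simp only [loopA, Option.isNone_none, Bool.true_and, decide_eq_true_eq, if_neg h1,
      Option.isSome_none, Bool.false_and, Bool.false_eq_true, if_false]
    exact ih root (i+1) (fun x hx => hall x (by simp [hx]))
lemma loopA_some_idx : ∀ (xs : List Int) (root : Int) (j : Nat) (i : Nat),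
    loopA xs root (some j) i =
      if xs.any (fun x => decide (x < root)) then none else some (some j) := by
  intro xs
  induction xs with
  | nil => intro root j i; rfl
  | cons v rest ih =>
    intro root j i
    simp only [loopA, Option.isNone_some, Bool.false_and, Bool.false_eq_true, if_false,
      Option.isSome_some, Bool.true_and]
    by_cases h : v < root
    · simp [h]
    · simp [h, ih]
lemma loopA_split : ∀ (p : List Int) (v : Int) (q : List Int) (root : Int) (i : Nat),
    (∀ x ∈ p, ¬ root < x) → root < v →
    loopA (p ++ v :: q) root none i =
      if q.any (fun x => decide (x < root)) then none else some (some (i + p.length)) := by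
  intro p
  induction p with
  | nil =>
    intro v q root i _ hv
    simp only [List.nil_append, loopA, Option.isNone_none, Bool.true_and, decide_eq_true_eq,
      if_pos hv, Option.isSome_some, Bool.true_and]
    rw [if_neg (by simp; omega)]
    rw [loopA_some_idx]
    simp
  | cons u rest ih =>
    intro v q root i hall hv
    have h1 : ¬ root < u := hall u (by simp)
    simp only [List.cons_append, loopA, Option.isNone_none, Bool.true_and, decide_eq_true_eq,
      if_neg h1, Option.isSome_none, Bool.false_and, Bool.false_eq_true, if_false]
    rw [ih v q root (i+1) (fun x hx => hall x (by simp [hx])) hv]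
    have e : i + 1 + rest.length = i + (u :: rest).length := by simp; omega
    rw [e]
lemma dropWhile_head_false {α : Type} (p : α → Bool) : ∀ (l : List α) (v : α) (q : List α),
    l.dropWhile p = v :: q → p v = false := by
  intro l
  induction l with
  | nil => intro v q h; simp at h
  | cons x rest ih =>
    intro v q h
    by_cases hx : p x = true
    · rw [List.dropWhile_cons_of_pos hx] at h; exact ih v q h
    · rw [List.dropWhile_cons_of_neg (by simp [hx])] at h
      cases h
      simpa using hx

-- ===== minimum of a nonempty list =====
def sMin (s : List Int) : Int := s.min?.getD 0

lemma sMin_spec : ∀ (s : List Int), s ≠ [] → sMin s ∈ s ∧ ∀ b ∈ s, sMin s ≤ b := by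
  intro s h
  cases hm : s.min? with
  | none => exact absurd (List.min?_eq_none_iff.mp hm) h
  | some a =>
    have := List.min?_eq_some_iff.mp hm
    simpa [sMin, hm] using this

-- A's unfolding on a nonempty list
lemma vA_nil : verifySquenceOfBST [] = true := by rw [verifySquenceOfBST]; simp

lemma vA_concat : ∀ (w : List Int) (root : Int),
    verifySquenceOfBST (w ++ [root]) =
      match loopA w root none 0 with
      | none => false
      | some none => verifySquenceOfBST w && verifySquenceOfBST w
      | some (some i) => verifySquenceOfBST (w.take i) && verifySquenceOfBST (w.drop i) := by
  intro w root
  rw [verifySquenceOfBST]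
  rw [dif_neg (by simp)]
  simp only [List.getLast_concat, List.dropLast_concat]

lemma runB_cons (v : Int) (xs : List Int) (b : Option Int) (st : List Int) (h : obLE v b) :
    runB (v :: xs) (b, st) =
      runB xs ((popLoop v b st).1, v :: st.dropWhile (fun t => decide (v < t))) := by
  show (match stepB v (b, st) with | none => none | some s' => runB xs s') = _
  rw [stepB_ok v b st h, popLoop_snd]

lemma obLE_pop (x root : Int) (b : Option Int) (st : List Int) (hxb : obLE x b)
    (h : ∀ t ∈ st, root < t → x ≤ t) : obLE x (popLoop root b st).1 := by
  rcases popLoop_fst st root b with he | ⟨t, ht, he, hlt⟩ <;> rw [he]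
  · exact hxb
  · exact h t ht hlt

-- A's loop on w either reports no element above the root, or yields the canonical split
lemma loopA_cases (w : List Int) (root : Int) :
    (loopA w root none 0 = some none ∧ ∀ x ∈ w, ¬ root < x) ∨
    (∃ p v q, w = p ++ v :: q ∧ (∀ x ∈ p, ¬ root < x) ∧ root < v ∧
      loopA w root none 0 =
        (if (v :: q).any (fun x => decide (x < root)) then none else some (some p.length))) := by
  by_cases hex : ∀ x ∈ w, ¬ root < x
  · exact Or.inl ⟨loopA_none_all w root 0 hex, hex⟩
  · right
    push_neg at hex
    obtain ⟨x, hx, hlt⟩ := hex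
    set tw := w.takeWhile (fun x => !decide (root < x)) with htw
    have hwpr : tw ++ w.dropWhile (fun x => !decide (root < x)) = w :=
      List.takeWhile_append_dropWhile
    cases hd : w.dropWhile (fun x => !decide (root < x)) with
    | nil =>
      exfalso
      have hxin : x ∈ tw := by
        rw [← hwpr, hd, List.append_nil] at hx; exact hx
      have := List.mem_takeWhile_imp (htw ▸ hxin)
      simp at this; omega
    | cons v q =>
      have hw2 : w = tw ++ v :: q := by rw [← hwpr, hd]
      have hp : ∀ y ∈ tw, ¬ root < y := by
        intro y hy
        have := List.mem_takeWhile_imp (htw ▸ hy)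
        simp at this; omega
      have hv : root < v := by
        have := dropWhile_head_false _ w v q hd
        simp at this; omega
      refine ⟨tw, v, q, hw2, hp, hv, ?_⟩
      have heq := loopA_split tw v q root 0 hp hv
      rw [hw2, heq]
      have hva : ((v :: q).any fun x => decide (x < root)) = (q.any fun x => decide (x < root)) := by
        simp only [List.any_cons, Bool.or_eq_true, decide_eq_true_eq]
        by_cases hq : (q.any fun x => decide (x < root)) = true <;> simp [hq] <;> omega
      rw [hva]; simp

-- completeness: a sequence accepted by A is accepted by B's machine, with the
-- final machine state characterized relative to the input state
set_option maxHeartbeats 2000000 in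
lemma lemC : ∀ (n : Nat) (s : List Int), s.length ≤ n → s ≠ [] → verifySquenceOfBST s = true →
    ∀ (b : Option Int) (st : List Int), List.Pairwise (· ≥ ·) st →
    (∀ x ∈ s, obLE x b) →
    (∀ t ∈ st, (∀ x ∈ s, x ≤ t) ∨ (∀ x ∈ s, t ≤ x)) →
    ∀ (m : Int), m = sMin s →
    ∃ b' σ, runB s.reverse (b, st) = some (b', σ ++ st.dropWhile (fun t => decide (m < t)))
      ∧ (∀ y ∈ σ, y ∈ s ∧ m ≤ y)
      ∧ List.Pairwise (· ≥ ·) (σ ++ st.dropWhile (fun t => decide (m < t)))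
      ∧ (b' = b ∨ ∃ t, b' = some t ∧ m < t ∧ (t ∈ s ∨ t ∈ st)) := by
  intro n
  induction n with
  | zero =>
    intro s hl hne
    exact absurd (List.length_eq_zero_iff.mp (Nat.le_zero.mp hl)) hne
  | succ n ih =>
    intro s hl hne hA b st hsort hbnd hdich m hm
    rcases List.eq_nil_or_concat s with rfl | ⟨w, root, hs⟩
    · exact absurd rfl hne
    rw [List.concat_eq_append] at hs
    subst hs
    obtain ⟨hms1, hms2⟩ := sMin_spec (w ++ [root]) (by simp)
    rw [← hm] at hms1 hms2
    have hmroot : m ≤ root := hms2 root (by simp)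
    have hrootmem : root ∈ w ++ [root] := by simp
    have hbroot : obLE root b := hbnd root hrootmem
    have hrev : (w ++ [root]).reverse = root :: w.reverse := by simp
    have hb1 := popLoop_fst st root b
    have hsort1 : List.Pairwise (· ≥ ·) (root :: st.dropWhile (fun t => decide (root < t))) :=
      sorted_dropWhile st root hsort
    have hst1le : ∀ t ∈ st.dropWhile (fun t => decide (root < t)), t ≤ root :=
      fun t ht => mem_dropWhile_le st root t hsort ht
    have hst1sub : ∀ t ∈ st.dropWhile (fun t => decide (root < t)), t ∈ st :=
      fun t ht => (List.dropWhile_sublist _).subset ht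
    have hwlen : w.length ≤ n := by simp at hl; omega
    have hb1bnd : ∀ x ∈ w, obLE x (popLoop root b st).1 := by
      intro x hx
      refine obLE_pop x root b st (hbnd x (by simp [hx])) ?_
      intro t ht hlt
      rcases hdich t ht with h | h
      · exact h x (by simp [hx])
      · have := h root (by simp); omega
    rw [hrev, runB_cons root w.reverse b st hbroot]
    rw [vA_concat] at hA
    rcases loopA_cases w root with ⟨hloop, hall⟩ | ⟨p, v, q, hw2, hp, hv, hloop⟩
    · -- CASE 1: no element of w exceeds root
      rw [hloop] at hA
      replace hA : (verifySquenceOfBST w && verifySquenceOfBST w) = true := hA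
      have hAw : verifySquenceOfBST w = true := ((Bool.and_eq_true _ _).mp hA).1
      by_cases hw0 : w = []
      · -- s = [root]
        subst hw0
        have hmr : m = root := by simpa using hms1
        rw [hmr]
        refine ⟨(popLoop root b st).1, [root], rfl, ?_, hsort1, ?_⟩
        · intro y hy; simp at hy; exact ⟨by simp [hy], by omega⟩
        · rcases hb1 with he | ⟨t, ht, he, hlt⟩
          · exact Or.inl he
          · exact Or.inr ⟨t, he, hlt, Or.inr ht⟩
      · -- w nonempty, all of it ≤ root
        obtain ⟨hmw1, hmw2⟩ := sMin_spec w hw0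
        have hwle : sMin w ≤ root := by have := hall _ hmw1; omega
        have hmeq : m = sMin w := by
          refine le_antisymm (hms2 _ (by simp [hmw1])) ?_
          rcases List.mem_append.mp hms1 with h | h
          · exact hmw2 _ h
          · have := List.mem_singleton.mp h; omega
        obtain ⟨b₂, σw, hrun2, hσw, hsort2, hb2⟩ := ih w hwlen hw0 hAw (popLoop root b st).1
            (root :: st.dropWhile (fun t => decide (root < t))) hsort1 hb1bnd
            (by
              intro t ht
              rcases List.mem_cons.mp ht with rfl | ht1
              · exact Or.inl (fun x hx => by have := hall x hx; omega)
              · rcases hdich t (hst1sub t ht1) with h | h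
                · exact Or.inl (fun x hx => h x (by simp [hx]))
                · exact Or.inr (fun x hx => h x (by simp [hx]))) m hmeq
        have hbchase : (b₂ = b ∨ ∃ t, b₂ = some t ∧ m < t ∧ (t ∈ w ++ [root] ∨ t ∈ st)) := by
          rcases hb2 with he | ⟨t, he, hlt, hmem⟩
          · rcases hb1 with he1 | ⟨u, hu, he1, hltu⟩
            · exact Or.inl (he.trans he1)
            · exact Or.inr ⟨u, he.trans he1, by omega, Or.inr hu⟩
          · refine Or.inr ⟨t, he, hlt, ?_⟩
            rcases hmem with h | h
            · exact Or.inl (by simp [h])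
            · rcases List.mem_cons.mp h with rfl | h1
              · exact Or.inl (by simp)
              · exact Or.inr (hst1sub _ h1)
        by_cases hmr : m < root
        · have hdw : (root :: st.dropWhile (fun t => decide (root < t))).dropWhile
              (fun t => decide (m < t)) = st.dropWhile (fun t => decide (m < t)) := by
            rw [List.dropWhile_cons_of_pos (by simpa using hmr)]
            exact dropWhile_dropWhile _ _ st (by intro x hx; simp at hx ⊢; omega)
          rw [hdw] at hrun2 hsort2
          refine ⟨b₂, σw, hrun2, ?_, hsort2, hbchase⟩
          intro y hy; obtain ⟨h1, h2⟩ := hσw y hy; exact ⟨by simp [h1], h2⟩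
        · have hmeq2 : m = root := le_antisymm hmroot (by omega)
          have hdw : (root :: st.dropWhile (fun t => decide (root < t))).dropWhile
              (fun t => decide (m < t)) = root :: st.dropWhile (fun t => decide (m < t)) := by
            rw [List.dropWhile_cons_of_neg (by simp; omega)]
            rw [hmeq2]
          rw [hdw] at hrun2 hsort2
          refine ⟨b₂, σw ++ [root], ?_, ?_, ?_, hbchase⟩
          · rw [hrun2]; simp
          · intro y hy
            rcases List.mem_append.mp hy with h | h
            · obtain ⟨h1, h2⟩ := hσw y h; exact ⟨by simp [h1], h2⟩
            · have := List.mem_singleton.mp h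
              exact ⟨by simp [this], by omega⟩
          · simpa [List.append_assoc] using hsort2
    · -- CASE 2: canonical split w = p ++ v :: q with root < v
      subst hw2
      rw [hloop] at hA
      by_cases hq : ((v :: q).any fun x => decide (x < root)) = true
      · rw [if_pos hq] at hA
        exact absurd (hA : false = true) (by simp)
      · rw [if_neg hq] at hA
        replace hA : (verifySquenceOfBST ((p ++ v :: q).take p.length) &&
            verifySquenceOfBST ((p ++ v :: q).drop p.length)) = true := hA
        rw [List.take_left, List.drop_left] at hA
        obtain ⟨hAl, hAr⟩ := (Bool.and_eq_true _ _).mp hA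
        have hrge : ∀ x ∈ v :: q, root ≤ x := by
          intro x hx
          rcases List.mem_cons.mp hx with rfl | hx1
          · omega
          · by_contra hcon
            exact hq (List.any_eq_true.mpr ⟨x, by simp [hx1], by simp; omega⟩)
        have hrlen : (v :: q).length ≤ n := by simp at hl ⊢; omega
        obtain ⟨hmr1, hmr2⟩ := sMin_spec (v :: q) (by simp)
        have hrootmr : root ≤ sMin (v :: q) := hrge _ hmr1
        obtain ⟨b₂, σr, hrun2, hσr, hsort2, hb2⟩ := ih (v :: q) hrlen (by simp) hAr
            (popLoop root b st).1 (root :: st.dropWhile (fun t => decide (root < t))) hsort1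
            (fun x hx => hb1bnd x (by simp [hx]))
            (by
              intro t ht
              right
              intro x hx
              rcases List.mem_cons.mp ht with rfl | ht1
              · exact hrge x hx
              · have := hst1le t ht1; have := hrge x hx; omega)
            (sMin (v :: q)) rfl
        have hdwr : (root :: st.dropWhile (fun t => decide (root < t))).dropWhile
            (fun t => decide (sMin (v :: q) < t)) = root :: st.dropWhile (fun t => decide (root < t)) :=
          List.dropWhile_cons_of_neg (by simp; omega)
        rw [hdwr] at hrun2 hsort2
        have hrevw : (p ++ v :: q).reverse = (v :: q).reverse ++ p.reverse := by simp
        rw [hrevw, runB_append, hrun2]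
        simp only [Option.bind_some]
        by_cases hp0 : p = []
        · -- no left part: we are done after the right subtree
          subst hp0
          have hmr : m = root := by
            refine le_antisymm hmroot ?_
            rcases List.mem_append.mp hms1 with h | h
            · have := hrge _ (by simpa using h); omega
            · have := List.mem_singleton.mp h; omega
          rw [hmr]
          refine ⟨b₂, σr ++ [root], by simp [runB], ?_, ?_, ?_⟩
          · intro y hy
            rcases List.mem_append.mp hy with h | h
            · obtain ⟨h1, h2⟩ := hσr y h
              exact ⟨by simp at h1 ⊢; tauto, by omega⟩
            · have := List.mem_singleton.mp h
              exact ⟨by simp [this], by omega⟩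
          · simpa [List.append_assoc] using hsort2
          · rcases hb2 with he | ⟨t, he, hlt, hmem⟩
            · rcases hb1 with he1 | ⟨u, hu, he1, hltu⟩
              · exact Or.inl (he.trans he1)
              · exact Or.inr ⟨u, he.trans he1, by omega, Or.inr hu⟩
            · refine Or.inr ⟨t, he, by omega, ?_⟩
              rcases hmem with h | h
              · exact Or.inl (by simp only [List.mem_cons] at h ⊢; simp; tauto)
              · rcases List.mem_cons.mp h with rfl | h1
                · omega
                · exact Or.inr (hst1sub _ h1)
        · -- left part nonempty: continue with the left subtree
          obtain ⟨hmp1, hmp2⟩ := sMin_spec p hp0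
          have hple : sMin p ≤ root := by have := hp _ hmp1; omega
          have hplen : p.length ≤ n := by simp at hl ⊢; omega
          obtain ⟨b₃, σp, hrun3, hσp, hsort3, hb3⟩ := ih p hplen hp0 hAl b₂
              (σr ++ root :: st.dropWhile (fun t => decide (root < t))) hsort2
              (by
                intro x hx
                have hxr : x ≤ root := by have := hp x hx; omega
                rcases hb2 with he | ⟨t, he, hlt, hmem⟩
                · rw [he]
                  exact hb1bnd x (by simp [hx])
                · rw [he]
                  show x ≤ t
                  rcases hmem with h | h
                  · have := hrge t h; omega
                  · rcases List.mem_cons.mp h with rfl | h1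
                    · omega
                    · have := hst1le t h1; omega)
              (by
                intro t ht
                rcases List.mem_append.mp ht with h | h
                · exact Or.inl (fun x hx => by
                    have := (hσr t h).2
                    have := hp x hx
                    omega)
                · rcases List.mem_cons.mp h with rfl | h1
                  · exact Or.inl (fun x hx => by have := hp x hx; omega)
                  · rcases hdich t (hst1sub t h1) with hdi | hdi
                    · exact Or.inl (fun x hx => hdi x (by simp [hx]))
                    · exact Or.inr (fun x hx => hdi x (by simp [hx])))
              (sMin p) rfl
          have hmps : m = sMin p := by
            refine le_antisymm (hms2 _ (by simp [hmp1])) ?_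
            rcases List.mem_append.mp hms1 with h | h
            · rcases List.mem_append.mp h with h3 | h3
              · exact hmp2 _ h3
              · have := hrge _ h3; omega
            · have := List.mem_singleton.mp h; omega
          rw [← hmps] at hrun3 hσp hsort3 hb3
          rw [hrun3]
          have hbchase : (b₃ = b ∨ ∃ t, b₃ = some t ∧ m < t ∧
              (t ∈ (p ++ v :: q) ++ [root] ∨ t ∈ st)) := by
            rcases hb3 with he3 | ⟨t, he3, hlt3, hmem3⟩
            · rcases hb2 with he2 | ⟨t, he2, hlt2, hmem2⟩
              · rcases hb1 with he1 | ⟨u, hu, he1, hltu⟩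
                · exact Or.inl ((he3.trans he2).trans he1)
                · exact Or.inr ⟨u, (he3.trans he2).trans he1, by omega, Or.inr hu⟩
              · refine Or.inr ⟨t, he3.trans he2, by omega, ?_⟩
                rcases hmem2 with h | h
                · exact Or.inl (by simp only [List.mem_cons] at h ⊢; simp; tauto)
                · rcases List.mem_cons.mp h with rfl | h1
                  · omega
                  · exact Or.inr (hst1sub _ h1)
            · refine Or.inr ⟨t, he3, hlt3, ?_⟩
              rcases hmem3 with h | h
              · exact Or.inl (by simp [h])
              · rcases List.mem_append.mp h with h1 | h1
                · exact Or.inl (by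
                    have := (hσr t h1).1
                    simp only [List.mem_cons] at this ⊢
                    simp
                    tauto)
                · rcases List.mem_cons.mp h1 with rfl | h2
                  · exact Or.inl (by simp)
                  · exact Or.inr (hst1sub _ h2)
          have hEsplit := List.dropWhile_append
            (p := fun t => decide (m < t)) (xs := σr)
            (ys := root :: st.dropWhile (fun t => decide (root < t)))
          by_cases hE : (σr.dropWhile (fun t => decide (m < t))).isEmpty = true
          · rw [hEsplit, if_pos hE]
            by_cases hmr2 : m < root
            · rw [List.dropWhile_cons_of_pos (by simpa using hmr2),
                dropWhile_dropWhile _ _ st (by intro x hx; simp at hx ⊢; omega)]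
              refine ⟨b₃, σp, rfl, ?_, ?_, hbchase⟩
              · intro y hy
                obtain ⟨h1, h2⟩ := hσp y hy
                exact ⟨by simp [h1], h2⟩
              · rw [hEsplit, if_pos hE, List.dropWhile_cons_of_pos (by simpa using hmr2),
                  dropWhile_dropWhile _ _ st (by intro x hx; simp at hx ⊢; omega)] at hsort3
                exact hsort3
            · have hpr : m = root := le_antisymm hmroot (by omega)
              rw [List.dropWhile_cons_of_neg (by simp; omega)]
              have hst1eq : st.dropWhile (fun t => decide (root < t)) =
                  st.dropWhile (fun t => decide (m < t)) := by rw [hpr]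
              rw [hst1eq]
              refine ⟨b₃, σp ++ [root], by simp, ?_, ?_, hbchase⟩
              · intro y hy
                rcases List.mem_append.mp hy with h | h
                · obtain ⟨h1, h2⟩ := hσp y h; exact ⟨by simp [h1], h2⟩
                · have := List.mem_singleton.mp h
                  exact ⟨by simp [this], by omega⟩
              · rw [hEsplit, if_pos hE, List.dropWhile_cons_of_neg (by simp; omega), hst1eq] at hsort3
                simpa [List.append_assoc] using hsort3
          · cases hE2 : σr.dropWhile (fun t => decide (m < t)) with
            | nil => rw [hE2] at hE; simp at hE
            | cons y ys =>
              have hy1 : ¬ (m < y) := by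
                have := dropWhile_head_false _ σr y ys hE2
                simpa using this
              have hy2 : y ∈ σr := (List.dropWhile_sublist _).subset (hE2 ▸ List.mem_cons_self)
              have hyr : sMin (v :: q) ≤ y := (hσr y hy2).2
              have hpr : m = root := by omega
              rw [hEsplit, if_neg (by simp [hE2])]
              have hst1eq : st.dropWhile (fun t => decide (root < t)) =
                  st.dropWhile (fun t => decide (m < t)) := by rw [hpr]
              rw [hst1eq]
              refine ⟨b₃, σp ++ σr.dropWhile (fun t => decide (m < t)) ++ [root],
                by simp [List.append_assoc], ?_, ?_, hbchase⟩
              · intro z hz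
                rcases List.mem_append.mp hz with h | h
                · rcases List.mem_append.mp h with h1 | h1
                  · obtain ⟨h2, h3⟩ := hσp z h1; exact ⟨by simp [h2], h3⟩
                  · have hz2 : z ∈ σr := (List.dropWhile_sublist _).subset h1
                    obtain ⟨h2, h3⟩ := hσr z hz2
                    exact ⟨by simp only [List.mem_cons] at h2 ⊢; simp; tauto, by omega⟩
                · have := List.mem_singleton.mp h
                  exact ⟨by simp [this], by omega⟩
              · rw [hEsplit, if_neg (by simp [hE2]), hst1eq] at hsort3
                simpa [List.append_assoc] using hsort3

-- soundness: a sequence accepted by B's machine is accepted by A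
lemma lemS : ∀ (n : Nat) (s : List Int), s.length ≤ n →
    (runB s.reverse (none, ([] : List Int))).isSome = true → verifySquenceOfBST s = true := by
  intro n
  induction n with
  | zero =>
    intro s hl _
    have := List.length_eq_zero_iff.mp (Nat.le_zero.mp hl)
    subst this
    exact vA_nil
  | succ n ih =>
    intro s hl hrun
    rcases List.eq_nil_or_concat s with rfl | ⟨w, root, hs⟩
    · exact vA_nil
    rw [List.concat_eq_append] at hs
    subst hs
    have hrev : (w ++ [root]).reverse = root :: w.reverse := by simp
    rw [hrev, runB_cons root w.reverse none [] trivial] at hrun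
    have hrun2 : (runB w.reverse (none, [root])).isSome = true := hrun
    rw [vA_concat]
    rcases loopA_cases w root with ⟨hloop, hall⟩ | ⟨p, v, q, hw2, hp, hv, hloop⟩
    · rw [hloop]
      have hw : (runB w.reverse (none, ([] : List Int))).isSome = true :=
        run_pristine w.reverse none [root] (by simp) hrun2
      have hAw := ih w (by simp at hl; omega) hw
      simp [hAw]
    · subst hw2
      rw [hloop]
      have hsplit : (p ++ v :: q).reverse = (v :: q).reverse ++ p.reverse := by simp
      rw [hsplit, runB_append] at hrun2
      cases hmid : runB (v :: q).reverse (none, [root]) with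
      | none => rw [hmid] at hrun2; simp at hrun2
      | some mid =>
        rw [hmid] at hrun2
        simp only [Option.bind_some] at hrun2
        -- every element of the right part is ≥ root, else the run would have failed
        have hrge : ∀ x ∈ v :: q, root ≤ x := by
          cases hd : (v :: q).reverse.dropWhile (fun y => decide (root ≤ y)) with
          | nil =>
            intro x hx
            have hx' : x ∈ (v :: q).reverse := List.mem_reverse.mpr hx
            rw [← List.takeWhile_append_dropWhile (p := fun y => decide (root ≤ y))
              (l := (v :: q).reverse), hd, List.append_nil] at hx'
            simpa using List.mem_takeWhile_imp hx'
          | cons u zs =>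
            exfalso
            have hu : ¬ root ≤ u := by
              have := dropWhile_head_false _ ((v :: q).reverse) u zs hd
              simpa using this
            have hys : ∀ y ∈ (v :: q).reverse.takeWhile (fun y => decide (root ≤ y)), root ≤ y := by
              intro y hy
              simpa using List.mem_takeWhile_imp hy
            have hpr : (v :: q).reverse =
                (v :: q).reverse.takeWhile (fun y => decide (root ≤ y)) ++ u :: zs := by
              conv_lhs => rw [← List.takeWhile_append_dropWhile
                (p := fun y => decide (root ≤ y)) (l := (v :: q).reverse)]
              rw [hd]
            rw [hpr, runB_append] at hmid
            cases h1 : runB ((v :: q).reverse.takeWhile (fun y => decide (root ≤ y))) (none, [root]) with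
            | none => rw [h1] at hmid; simp at hmid
            | some s₁ =>
              rw [h1] at hmid
              simp only [Option.bind_some] at hmid
              obtain ⟨b₁, σ, hs₁, hσ⟩ := rootkeep _ none [] root [] s₁ hys (by simp) h1
              subst hs₁
              unfold runB at hmid
              cases hst : stepB u (b₁, σ ++ root :: []) with
              | none => rw [hst] at hmid; cases hmid
              | some s₂ =>
                rw [hst] at hmid
                obtain ⟨hub, rfl⟩ := stepB_some_iff u b₁ _ s₂ hst
                have hpop : popLoop u b₁ (σ ++ root :: []) = (some root, []) := by
                  have hgt : ∀ t ∈ σ ++ root :: [], u < t := by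
                    intro t ht
                    rcases List.mem_append.mp ht with h | h
                    · have := hσ t h; omega
                    · simp at h; omega
                  rw [popLoop_all_gt (σ ++ root :: []) u b₁ (by simp) hgt]
                  congr 1
                  exact congrArg some (List.getLast_concat)
                rw [hpop] at hmid
                have hbound := runB_bound zs (some root) [u] mid
                  (⟨by simp, by intro t ht; simp at ht; simp only [obLE]; omega⟩) hmid
                have hvlast : (v :: q).reverse.getLast? = some v := by
                  rw [List.getLast?_reverse]
                  rfl
                cases zs with
                | nil =>
                  rw [hpr, List.getLast?_concat] at hvlast
                  have : u = v := by simpa using hvlast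
                  omega
                | cons z zs' =>
                  have he : ((v :: q).reverse.takeWhile (fun y => decide (root ≤ y)) ++
                      u :: z :: zs').getLast? = (z :: zs').getLast? := by
                    have h2 : (u :: z :: zs') = [u] ++ (z :: zs') := rfl
                    rw [h2, ← List.append_assoc, List.getLast?_append]
                    cases hg : (z :: zs').getLast? with
                    | none => simp at hg
                    | some g => simp
                  rw [hpr, he] at hvlast
                  have hvmem : v ∈ z :: zs' := List.mem_of_getLast? hvlast
                  have := hbound v hvmem
                  simp only [obLE] at this
                  omega
        have hAr : verifySquenceOfBST (v :: q) = true := by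
          refine ih (v :: q) (by simp at hl ⊢; omega) ?_
          exact run_pristine (v :: q).reverse none [root] (by simp) (by rw [hmid]; rfl)
        have hInv : InvB mid.1 mid.2 :=
          runB_inv (v :: q).reverse none [root] mid ⟨by simp, by intro t ht; trivial⟩ hmid
        have hAl : verifySquenceOfBST p = true := by
          refine ih p (by simp at hl; omega) ?_
          exact run_pristine p.reverse mid.1 mid.2 hInv.1 hrun2
        have hqnone : ¬ ((v :: q).any fun x => decide (x < root)) = true := by
          intro hcon
          obtain ⟨x, hx, hlt⟩ := List.any_eq_true.mp hcon
          have := hrge x hx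
          simp at hlt
          omega
        rw [if_neg hqnone]
        show (verifySquenceOfBST (List.take p.length (p ++ v :: q)) &&
          verifySquenceOfBST (List.drop p.length (p ++ v :: q))) = true
        rw [List.take_left, List.drop_left]
        simp [hAl, hAr]

-- ===== VERDICT (by name: the statement is the Claim_ definition above) =====
theorem verifySquenceOfBST_spec : Claim_equal_verifySquenceOfBST := by
  unfold Claim_equal_verifySquenceOfBST Spec_verifySquenceOfBST
  intro s _
  unfold verifySquenceOfBST_alt
  rw [loopB_eq_runB]
  by_cases hs : s = []
  · subst hs
    rw [vA_nil]
    rfl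
  · by_cases hA : verifySquenceOfBST s = true
    · rw [hA]
      obtain ⟨b', σ, hrun, -⟩ := lemC s.length s le_rfl hs hA none [] (by simp)
        (fun _ _ => trivial) (by simp) (sMin s) rfl
      rw [hrun]
      rfl
    · have hA' : verifySquenceOfBST s = false := by
        revert hA; cases verifySquenceOfBST s <;> simp
      rw [hA']
      cases hrb : (runB s.reverse (none, ([] : List Int))).isSome with
      | false => rfl
      | true => exact absurd (lemS s.length s le_rfl hrb) (by simp [hA'])
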